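-- pv_equiv track=rewrite | github.com/BugBubbles/Docx-converter | docx_converter/utils/file_div.py | _balanced_ranges
-- ===== SOURCE A (Python) =====
-- def _get_balanced_part_nums(total, part_size):
--     base = int(total / part_size)
--     remainder = total % part_size
--     return [base + int(i < remainder) for i in range(part_size)]
--
-- def _balanced_ranges(total, part_size):
--     balanced_part_nums = _get_balanced_part_nums(total, part_size)
--     ranges = []
--     start = 0
--     for part_num in balanced_part_nums:
--         end = start + part_num
--         ranges.append((start, end))
--         start = end
--     return ranges
-- ===== SOURCE B (Python) =====
-- def _balanced_ranges(total, part_size):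
--     base = int(total / part_size)
--     remainder = total % part_size
--     return [(i * base + min(i, remainder),
--              (i + 1) * base + min(i + 1, remainder))
--             for i in range(part_size)]
-- ===== Notes on version B (the rewrite author's own statement) =====
-- stated objective: simpler
-- what changed: B replaces A's helper part-sizes list and sequential start/end accumulator with a single comprehension computing each range in closed form from its index (start_i = i*base + min(i, remainder)).
-- outside the precondition, e.g. on _balanced_ranges(7, 0): A raises ZeroDivisionError, B raises ZeroDivisionError
import Mathlib
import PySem

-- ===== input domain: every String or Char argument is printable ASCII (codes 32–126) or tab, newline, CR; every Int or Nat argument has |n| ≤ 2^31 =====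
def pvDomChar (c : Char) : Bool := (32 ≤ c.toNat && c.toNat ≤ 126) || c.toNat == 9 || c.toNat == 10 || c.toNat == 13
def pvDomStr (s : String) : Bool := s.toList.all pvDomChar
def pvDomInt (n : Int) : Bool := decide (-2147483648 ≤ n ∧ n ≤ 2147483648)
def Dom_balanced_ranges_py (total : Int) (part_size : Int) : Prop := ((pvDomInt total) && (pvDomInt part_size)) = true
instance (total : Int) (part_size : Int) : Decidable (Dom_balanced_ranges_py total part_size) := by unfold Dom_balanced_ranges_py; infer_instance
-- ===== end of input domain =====

-- B replaces A's part-sizes list + running start/end accumulator by one comprehension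
-- computing each range in closed form from its index (objective: simpler).


-- ===== PORT A =====
-- int(total / part_size) truncates the float quotient toward zero; on Dom (|args| ≤ 2^31 < 2^53)
-- that float truncation is exact and equals Int.tdiv (truncating integer division).
def pv_get_balanced_part_nums (total : Int) (part_size : Int) : List Int :=
  let base := Int.tdiv total part_size
  let remainder := PySem.Int.mod total part_size
  (PySem.List.pyRange 0 part_size 1).map (fun i => base + (if i < remainder then (1:Int) else 0))

def balanced_ranges_py (total : Int) (part_size : Int) : List (Int × Int) :=
  let balanced_part_nums := pv_get_balanced_part_nums total part_size
  (balanced_part_nums.foldl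
    (fun (st : List (Int × Int) × Int) pn => (st.1 ++ [(st.2, st.2 + pn)], st.2 + pn))
    ([], 0)).1

-- ===== PORT B =====
def balanced_ranges_py_alt (total : Int) (part_size : Int) : List (Int × Int) :=
  let base := Int.tdiv total part_size
  let remainder := PySem.Int.mod total part_size
  (PySem.List.pyRange 0 part_size 1).map (fun i =>
    (i * base + min i remainder, (i + 1) * base + min (i + 1) remainder))

-- ===== PRECONDITION & SPEC =====
-- Python raises ZeroDivisionError at part_size = 0; that is all Pre_ excludes.
def Pre_balanced_ranges_py (total : Int) (part_size : Int) : Prop := part_size ≠ 0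
instance (total : Int) (part_size : Int) : Decidable (Pre_balanced_ranges_py total part_size) := by unfold Pre_balanced_ranges_py; infer_instance
def pvWitness_balanced_ranges_py : Int × Int := (7, 3)

def Spec_balanced_ranges_py (total : Int) (part_size : Int) (out : List (Int × Int)) : Prop := out = balanced_ranges_py_alt total part_size
instance (total : Int) (part_size : Int) (out : List (Int × Int)) : Decidable (Spec_balanced_ranges_py total part_size out) := by unfold Spec_balanced_ranges_py; infer_instance

-- ===== CLAIM (what is proved, stated in full; the proofs are below) =====
def Claim_equal_balanced_ranges_py : Prop := ∀ (total : Int) (part_size : Int), Dom_balanced_ranges_py total part_size → Pre_balanced_ranges_py total part_size → Spec_balanced_ranges_py total part_size (balanced_ranges_py total part_size)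

-- ===== LEMMAS AND PROOFS =====
lemma min_step (k r : Int) : min k r + (if k < r then (1:Int) else 0) = min (k + 1) r := by
  rcases lt_or_ge k r with h | h
  · rw [if_pos h, min_eq_left h.le, min_eq_left (by omega)]
  · rw [if_neg (not_lt.mpr h), min_eq_right h, min_eq_right (by omega), add_zero]

lemma fold_closed (b r : Int) (hr : 0 ≤ r) (n : Nat) :
    (((List.range n).map (fun (k : Nat) => b + (if (k:Int) < r then (1:Int) else 0))).foldl
      (fun (st : List (Int × Int) × Int) pn => (st.1 ++ [(st.2, st.2 + pn)], st.2 + pn)) ([], 0))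
    = ((List.range n).map (fun (k : Nat) => ((k:Int) * b + min (k:Int) r, ((k:Int) + 1) * b + min ((k:Int) + 1) r)),
       (n:Int) * b + min (n:Int) r) := by
  induction n with
  | zero => simp [min_eq_left hr]
  | succ n ih =>
    rw [List.range_succ, List.map_append, List.map_append, List.foldl_append, ih]
    simp only [List.map_cons, List.map_nil, List.foldl_cons, List.foldl_nil]
    have h : (n:Int) * b + min (n:Int) r + (b + (if (n:Int) < r then (1:Int) else 0))
        = ((n:Int) + 1) * b + min ((n:Int) + 1) r := by
      have hm := min_step (n:Int) r
      rw [add_mul, one_mul]; linarith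
    refine Prod.ext ?_ ?_
    · simp [h]
    · push_cast
      simpa using h

-- ===== VERDICT (by name: the statement is the Claim_ definition above) =====
theorem balanced_ranges_py_spec : Claim_equal_balanced_ranges_py := by
  intro total part_size _ _
  unfold Spec_balanced_ranges_py
  simp only [balanced_ranges_py, balanced_ranges_py_alt, pv_get_balanced_part_nums,
    PySem.List.pyRange_one, sub_zero, zero_add, List.map_map, Function.comp_def]
  rcases le_or_gt part_size 0 with hp | hp
  · rw [Int.toNat_of_nonpos hp]; simp
  · rw [fold_closed _ _ (PySem.Int.mod_nonneg total hp)]
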